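-- pv_equiv track=rewrite | github.com/xiaobaozidi/magma_g2fuzz | fuzzers/g2fuzz/repo/py_utils/func.py | extract_res_for_pip
-- ===== SOURCE A (Python) =====
-- def extract_res_for_pip(text):
--     res = None
--     valid = False
--
--     count = 0
--     modified_text = ""
--     lines = text.split("\n")
--     starts = []
--     ends = []
--     line_cnt = 0
--     for line in lines:
--         if line.startswith("```"):
--             if count % 2 == 0:
--                 starts.append(line_cnt)
--             else:
--                 ends.append(line_cnt)
--             count += 1
--         else:
--             modified_text += line + "\n"
--
--         line_cnt += 1
--
--     if len(starts) == 0 and len(ends) == 0: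
--         msg = "There is no code block in the input text. Please use Markdown syntax to represent code blocks. Please ensure that there is only one code block."
--
--         res = msg
--         valid = False
--     elif len(starts) != len(ends):
--         msg = "The code blocks in the input text are not conforming to the Markdown syntax."
--
--         res = msg
--         valid = False
--     elif len(starts) > 1:
--         msg = "There are several code blocks in the input text. Please ensure that there is only one code block."
--
--         res = msg
--         valid = False
--
--     if res:
--         # did not generate the code block
--         return res, valid
--
--     res = "\n".join(lines[starts[0]+1:ends[0]])
--
--     if "pip" not in res:
--         msg = "You should install the library via pip"
--
--         res = msg
--         valid = False
--         return res, valid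
--
--     valid = True
--     return res, valid
-- ===== SOURCE B (Python) =====
-- def extract_res_for_pip(text):
--     # Segment the text: segments are the runs of lines separated by fence lines.
--     segs = [[]]
--     for line in text.split("\n"):
--         if line.startswith("```"):
--             segs.append([])
--         else:
--             segs[-1].append(line)
--     if len(segs) == 1:
--         return ("There is no code block in the input text. Please use Markdown syntax to represent code blocks. Please ensure that there is only one code block.", False)
--     if len(segs) % 2 == 0:
--         return ("The code blocks in the input text are not conforming to the Markdown syntax.", False)
--     if len(segs) > 3:
--         return ("There are several code blocks in the input text. Please ensure that there is only one code block.", False)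
--     res = "\n".join(segs[1])
--     if "pip" not in res:
--         return ("You should install the library via pip", False)
--     return (res, True)
-- ===== Notes on version B (the rewrite author's own statement) =====
-- stated objective: simpler
-- what changed: B replaces A's index bookkeeping (parity counter, separate start/end index lists, line counter, unused modified_text, then slicing by index) by segmenting the line list at the fence lines into a list of segments, validating by the segment count alone and returning the second segment directly, with no indices or slicing at all.
import Mathlib
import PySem

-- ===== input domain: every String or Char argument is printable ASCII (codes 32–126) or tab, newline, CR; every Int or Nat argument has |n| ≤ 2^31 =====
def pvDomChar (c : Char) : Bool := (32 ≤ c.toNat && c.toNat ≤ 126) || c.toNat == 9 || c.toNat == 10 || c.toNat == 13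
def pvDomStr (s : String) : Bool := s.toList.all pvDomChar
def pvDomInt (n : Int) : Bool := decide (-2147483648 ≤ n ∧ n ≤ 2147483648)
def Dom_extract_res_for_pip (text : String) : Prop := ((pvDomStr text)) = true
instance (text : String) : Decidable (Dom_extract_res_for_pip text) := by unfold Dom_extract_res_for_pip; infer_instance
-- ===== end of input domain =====

-- B segments the line list at the fence lines (a list of segments, no indices, no parity
-- counter, no slicing) and validates by the segment count; objective: simpler.

-- ===== PORT A =====
-- foldl state: (count, modified_text, starts, ends, line_cnt)
def extract_res_for_pip (text : String) : String × Bool :=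
  let lines := (PySem.Str.split? text "\n").getD []
  let st := lines.foldl
    (fun (st : Int × String × List Int × List Int × Int) line =>
      match st with
      | (count, modified_text, starts, ends, line_cnt) =>
        if PySem.Str.startswith line "```" then
          if PySem.Int.mod count 2 = 0 then
            (count + 1, modified_text, starts ++ [line_cnt], ends, line_cnt + 1)
          else
            (count + 1, modified_text, starts, ends ++ [line_cnt], line_cnt + 1)
        else
          (count, modified_text ++ line ++ "\n", starts, ends, line_cnt + 1))
    (0, "", [], [], 0)
  let starts := st.2.2.1
  let ends := st.2.2.2.1
  if starts.length = 0 ∧ ends.length = 0 then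
    ("There is no code block in the input text. Please use Markdown syntax to represent code blocks. Please ensure that there is only one code block.", false)
  else if starts.length ≠ ends.length then
    ("The code blocks in the input text are not conforming to the Markdown syntax.", false)
  else if starts.length > 1 then
    ("There are several code blocks in the input text. Please ensure that there is only one code block.", false)
  else
    -- starts and ends are nonempty here, so index 0 is in range; the .getD 0 default is unreachable
    let res := PySem.Str.join "\n"
      (PySem.List.slice lines (some ((PySem.List.pyGet? starts 0).getD 0 + 1))
        (some ((PySem.List.pyGet? ends 0).getD 0)))
    if ¬ (PySem.Str.isIn "pip" res) then
      ("You should install the library via pip", false)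
    else
      (res, true)

-- ===== PORT B =====
-- state: the list of segments; 'segs[-1].append(line)' = rewrite the last segment
def extract_res_for_pip_alt (text : String) : String × Bool :=
  let lines := (PySem.Str.split? text "\n").getD []
  let segs := lines.foldl
    (fun (segs : List (List String)) line =>
      if PySem.Str.startswith line "```" then segs ++ [[]]
      else segs.dropLast ++ [(segs.getLast?.getD []) ++ [line]])
    [[]]
  if segs.length = 1 then
    ("There is no code block in the input text. Please use Markdown syntax to represent code blocks. Please ensure that there is only one code block.", false)
  else if segs.length % 2 = 0 then
    ("The code blocks in the input text are not conforming to the Markdown syntax.", false)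
  else if segs.length > 3 then
    ("There are several code blocks in the input text. Please ensure that there is only one code block.", false)
  else
    -- segs has exactly three elements here; the .getD [] default is unreachable
    let res := PySem.Str.join "\n" ((PySem.List.pyGet? segs 1).getD [])
    if ¬ (PySem.Str.isIn "pip" res) then
      ("You should install the library via pip", false)
    else
      (res, true)

-- ===== PRECONDITION & SPEC =====
def Spec_extract_res_for_pip (text : String) (out : String × Bool) : Prop := out = extract_res_for_pip_alt text
instance (text : String) (out : String × Bool) : Decidable (Spec_extract_res_for_pip text out) := by unfold Spec_extract_res_for_pip; infer_instance

-- ===== CLAIM (what is proved, stated in full; the proofs are below) =====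
def Claim_equal_extract_res_for_pip : Prop := ∀ (text : String), Dom_extract_res_for_pip text → Spec_extract_res_for_pip text (extract_res_for_pip text)

-- ===== LEMMAS AND PROOFS =====

-- the elements of a list at even / odd positions
mutual
def pvEvens {α : Type} : List α → List α
  | [] => []
  | x :: xs => x :: pvOdds xs
def pvOdds {α : Type} : List α → List α
  | [] => []
  | _ :: xs => pvEvens xs
end

theorem pvLengths {α : Type} (F : List α) :
    (pvEvens F).length = (F.length + 1) / 2 ∧ (pvOdds F).length = F.length / 2 := by
  induction F with
  | nil => simp [pvEvens, pvOdds]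
  | cons x xs ih => simp [pvEvens, pvOdds, ih.1, ih.2]; omega

-- A's loop body, named for the proofs (definitionally the lambda in the port)
def pvStepA : (Int × String × List Int × List Int × Int) → String → (Int × String × List Int × List Int × Int) :=
  (fun st line =>
    match st with
    | (count, modified_text, starts, ends, line_cnt) =>
      if PySem.Str.startswith line "```" then
        if PySem.Int.mod count 2 = 0 then
          (count + 1, modified_text, starts ++ [line_cnt], ends, line_cnt + 1)
        else
          (count + 1, modified_text, starts, ends ++ [line_cnt], line_cnt + 1)
      else
        (count, modified_text ++ line ++ "\n", starts, ends, line_cnt + 1))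

-- the fence-line indices, with the enumeration start generalized
def pvFences (lines : List String) (k : Int) : List Int :=
  (PySem.List.enumerate lines k).filterMap
    (fun p => if PySem.Str.startswith p.2 "```" then some p.1 else none)

theorem pvFences_cons (l : String) (ls : List String) (k : Int) :
    pvFences (l :: ls) k =
      if PySem.Str.startswith l "```" then k :: pvFences ls (k + 1) else pvFences ls (k + 1) := by
  unfold pvFences
  rw [PySem.List.enumerate_cons, List.filterMap_cons]
  by_cases hl : PySem.Str.startswith l "```"
  · have hl' : PySem.Chars.startswith l.toList ['`', '`', '`'] = true := by simpa using hl
    simp [hl']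
  · have hl' : ¬ PySem.Chars.startswith l.toList ['`', '`', '`'] = true := by simpa using hl
    simp [hl']

-- loop invariant: A's fold distributes the fence indices alternately into starts / ends,
-- according to the parity of the running count
theorem pvInv (lines : List String) : ∀ (c : Int) (m : String) (s e : List Int) (k : Int),
    (lines.foldl pvStepA (c, m, s, e, k)).2.2.1 =
        s ++ (if PySem.Int.mod c 2 = 0 then pvEvens (pvFences lines k) else pvOdds (pvFences lines k)) ∧
    (lines.foldl pvStepA (c, m, s, e, k)).2.2.2.1 =
        e ++ (if PySem.Int.mod c 2 = 0 then pvOdds (pvFences lines k) else pvEvens (pvFences lines k)) := by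
  induction lines with
  | nil => intro c m s e k; simp [pvFences, pvEvens, pvOdds, PySem.List.enumerate_nil]
  | cons l ls ih =>
    intro c m s e k
    have hmod : PySem.Int.mod c 2 = c % 2 := PySem.Int.mod_eq_emod_of_pos (by omega)
    have hmod1 : PySem.Int.mod (c + 1) 2 = (c + 1) % 2 := PySem.Int.mod_eq_emod_of_pos (by omega)
    rw [List.foldl_cons]
    by_cases hl : PySem.Str.startswith l "```"
    · have hl' : PySem.Chars.startswith l.toList ['`', '`', '`'] = true := by simpa using hl
      by_cases hc : PySem.Int.mod c 2 = 0
      · have hc1 : ¬ PySem.Int.mod (c + 1) 2 = 0 := by rw [hmod1]; rw [hmod] at hc; omega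
        have hdvd : 2 ∣ c := (PySem.Int.mod_eq_zero_iff_dvd c 2).mp hc
        have hstep : pvStepA (c, m, s, e, k) l = (c + 1, m, s ++ [k], e, k + 1) := by
          simp [pvStepA, hl', hdvd]
        rw [hstep]
        obtain ⟨h1, h2⟩ := ih (c + 1) m (s ++ [k]) e (k + 1)
        rw [h1, h2, if_neg hc1, if_neg hc1, if_pos hc, if_pos hc, pvFences_cons, if_pos hl]
        constructor
        · show s ++ [k] ++ _ = s ++ pvEvens (k :: pvFences ls (k + 1))
          simp [pvEvens]
        · show e ++ _ = e ++ pvOdds (k :: pvFences ls (k + 1))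
          simp [pvOdds]
      · have hc1 : PySem.Int.mod (c + 1) 2 = 0 := by rw [hmod1]; rw [hmod] at hc; omega
        have hnd : ¬ 2 ∣ c := fun h => hc ((PySem.Int.mod_eq_zero_iff_dvd c 2).mpr h)
        have hstep : pvStepA (c, m, s, e, k) l = (c + 1, m, s, e ++ [k], k + 1) := by
          simp [pvStepA, hl', hnd]
        rw [hstep]
        obtain ⟨h1, h2⟩ := ih (c + 1) m s (e ++ [k]) (k + 1)
        rw [h1, h2, if_pos hc1, if_pos hc1, if_neg hc, if_neg hc, pvFences_cons, if_pos hl]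
        constructor
        · show s ++ _ = s ++ pvOdds (k :: pvFences ls (k + 1))
          simp [pvOdds]
        · show e ++ [k] ++ _ = e ++ pvEvens (k :: pvFences ls (k + 1))
          simp [pvEvens]
    · have hl' : ¬ PySem.Chars.startswith l.toList ['`', '`', '`'] = true := by simpa using hl
      have hstep : pvStepA (c, m, s, e, k) l = (c, m ++ l ++ "\n", s, e, k + 1) := by
        simp [pvStepA, hl']
      rw [hstep]
      obtain ⟨h1, h2⟩ := ih c (m ++ l ++ "\n") s e (k + 1)
      rw [h1, h2, pvFences_cons, if_neg hl]
      exact ⟨rfl, rfl⟩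

-- B's loop body, named for the proofs (definitionally the lambda in the port)
def pvStepB : List (List String) → String → List (List String) :=
  (fun segs line =>
    if PySem.Str.startswith line "```" then segs ++ [[]]
    else segs.dropLast ++ [(segs.getLast?.getD []) ++ [line]])

-- the segmentation, as a structural recursion on the lines
def pvSegs : List String → List (List String)
  | [] => [[]]
  | l :: ls =>
    if PySem.Str.startswith l "```" then [] :: pvSegs ls
    else
      match pvSegs ls with
      | s :: rest => (l :: s) :: rest
      | [] => [[l]]

theorem pvSegs_ne_nil (lines : List String) : pvSegs lines ≠ [] := by
  cases lines with
  | nil => simp [pvSegs]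
  | cons l ls =>
    unfold pvSegs
    split
    · simp
    · cases h : pvSegs ls <;> simp

-- B's fold, started on complete segments P and a partial last segment c, produces
-- P, then c extended by the head segment of the rest, then the remaining segments
theorem pvFoldB (lines : List String) : ∀ (P : List (List String)) (c : List String),
    lines.foldl pvStepB (P ++ [c]) = P ++ (c ++ (pvSegs lines).headI) :: (pvSegs lines).tail := by
  induction lines with
  | nil => intro P c; simp [pvSegs]
  | cons l ls ih =>
    intro P c
    rw [List.foldl_cons]
    by_cases hl : PySem.Str.startswith l "```"
    · have hl' : PySem.Chars.startswith l.toList ['`', '`', '`'] = true := by simpa using hl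
      have hstep : pvStepB (P ++ [c]) l = (P ++ [c]) ++ [[]] := by simp [pvStepB, hl']
      rw [hstep, ih (P ++ [c]) []]
      have hS : pvSegs (l :: ls) = [] :: pvSegs ls := by simp [pvSegs, hl']
      rw [hS]
      cases h : pvSegs ls with
      | nil => exact absurd h (pvSegs_ne_nil ls)
      | cons s rest => simp
    · have hl' : ¬ PySem.Chars.startswith l.toList ['`', '`', '`'] = true := by simpa using hl
      have hstep : pvStepB (P ++ [c]) l = P ++ [c ++ [l]] := by
        simp [pvStepB, hl']
      rw [hstep, ih P (c ++ [l])]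
      cases h : pvSegs ls with
      | nil => exact absurd h (pvSegs_ne_nil ls)
      | cons s rest =>
        have hS : pvSegs (l :: ls) = (l :: s) :: rest := by simp [pvSegs, hl', h]
        rw [hS]
        simp

theorem pvFoldB_init (lines : List String) :
    lines.foldl pvStepB [[]] = pvSegs lines := by
  have h := pvFoldB lines [] []
  simp only [List.nil_append] at h
  rw [h]
  cases hS : pvSegs lines with
  | nil => exact absurd hS (pvSegs_ne_nil lines)
  | cons s rest => simp

-- the fence positions as natural numbers, structurally
def pvFencesN : List String → List Nat
  | [] => []
  | l :: ls =>
    if PySem.Str.startswith l "```" then 0 :: (pvFencesN ls).map (· + 1)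
    else (pvFencesN ls).map (· + 1)

theorem pvFencesN_cons (l : String) (ls : List String) :
    pvFencesN (l :: ls) =
      if PySem.Str.startswith l "```" then 0 :: (pvFencesN ls).map (· + 1)
      else (pvFencesN ls).map (· + 1) := rfl

theorem pvSegs_cons (l : String) (ls : List String) :
    pvSegs (l :: ls) =
      if PySem.Str.startswith l "```" then [] :: pvSegs ls
      else match pvSegs ls with
           | s :: rest => (l :: s) :: rest
           | [] => [[l]] := rfl

theorem pvFences_eq (lines : List String) : ∀ (k : Int),
    pvFences lines k = (pvFencesN lines).map (fun n : Nat => (n : Int) + k) := by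
  induction lines with
  | nil => intro k; simp [pvFences, pvFencesN, PySem.List.enumerate_nil]
  | cons l ls ih =>
    intro k
    rw [pvFences_cons, pvFencesN_cons]
    by_cases hl : PySem.Str.startswith l "```"
    · rw [if_pos hl, if_pos hl, ih (k + 1), List.map_cons, List.map_map]
      simp only [Nat.cast_zero, zero_add]
      congr 1
      refine List.map_congr_left (fun n _ => ?_)
      simp only [Function.comp_apply]
      push_cast
      ring
    · rw [if_neg hl, if_neg hl, ih (k + 1), List.map_map]
      refine List.map_congr_left (fun n _ => ?_)
      simp only [Function.comp_apply]
      push_cast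
      ring

theorem pvSegs_length (lines : List String) :
    (pvSegs lines).length = (pvFencesN lines).length + 1 := by
  induction lines with
  | nil => simp [pvSegs, pvFencesN]
  | cons l ls ih =>
    rw [pvSegs_cons, pvFencesN_cons]
    by_cases hl : PySem.Str.startswith l "```"
    · rw [if_pos hl, if_pos hl]
      simpa using ih
    · rw [if_neg hl, if_neg hl]
      cases h : pvSegs ls with
      | nil => exact absurd h (pvSegs_ne_nil ls)
      | cons s rest => rw [h] at ih; simpa using ih

-- the head segment is the lines before the first fence
theorem pvSegs_headI (lines : List String) : ∀ (b : Nat) (rest : List Nat),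
    pvFencesN lines = b :: rest → (pvSegs lines).headI = lines.take b := by
  induction lines with
  | nil => intro b rest h; simp [pvFencesN] at h
  | cons l ls ih =>
    intro b rest h
    rw [pvFencesN_cons] at h
    rw [pvSegs_cons]
    by_cases hl : PySem.Str.startswith l "```"
    · rw [if_pos hl] at h
      obtain ⟨hb, -⟩ := List.cons.inj h
      rw [if_pos hl, ← hb]
      simp
    · rw [if_neg hl] at h
      cases hF : pvFencesN ls with
      | nil => rw [hF] at h; simp at h
      | cons b' rest' =>
        rw [hF] at h
        obtain ⟨hb, -⟩ := List.cons.inj h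
        rw [if_neg hl]
        cases hS : pvSegs ls with
        | nil => exact absurd hS (pvSegs_ne_nil ls)
        | cons s r =>
          have hhead := ih b' rest' hF
          rw [hS] at hhead
          simp only [List.headI_cons] at hhead
          simp [← hb, hhead]

-- the second segment is the lines strictly between the first two fences
theorem pvSegs_get1 (lines : List String) : ∀ (a b : Nat) (rest : List Nat),
    pvFencesN lines = a :: b :: rest →
    (pvSegs lines)[1]? = some ((lines.drop (a + 1)).take (b - (a + 1))) := by
  induction lines with
  | nil => intro a b rest h; simp [pvFencesN] at h
  | cons l ls ih =>
    intro a b rest h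
    rw [pvFencesN_cons] at h
    rw [pvSegs_cons]
    by_cases hl : PySem.Str.startswith l "```"
    · rw [if_pos hl] at h
      obtain ⟨ha, htl⟩ := List.cons.inj h
      cases hF : pvFencesN ls with
      | nil => rw [hF] at htl; simp at htl
      | cons b' rest' =>
        rw [hF] at htl
        obtain ⟨hb, -⟩ := List.cons.inj htl
        rw [if_pos hl]
        have hhead := pvSegs_headI ls b' rest' hF
        cases hS : pvSegs ls with
        | nil => exact absurd hS (pvSegs_ne_nil ls)
        | cons s r =>
          rw [hS] at hhead
          simp only [List.headI_cons] at hhead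
          simp [← ha, ← hb, hhead]
    · rw [if_neg hl] at h
      cases hF : pvFencesN ls with
      | nil => rw [hF] at h; simp at h
      | cons a' tl =>
        rw [hF] at h
        obtain ⟨ha, htl⟩ := List.cons.inj h
        cases tl with
        | nil => simp at htl
        | cons b' rest' =>
          obtain ⟨hb, -⟩ := List.cons.inj htl
          have hrec := ih a' b' rest' hF
          rw [if_neg hl]
          cases hS : pvSegs ls with
          | nil => exact absurd hS (pvSegs_ne_nil ls)
          | cons s r =>
            rw [hS] at hrec
            simp only [List.getElem?_cons_succ] at hrec ⊢
            rw [hrec]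
            congr 1
            rw [← ha, ← hb]
            simp only [List.drop_succ_cons]
            congr 1
            omega

-- ===== VERDICT (by name: the statement is the Claim_ definition above) =====
set_option maxRecDepth 4096 in
theorem extract_res_for_pip_spec : Claim_equal_extract_res_for_pip := by
  intro text _
  unfold Spec_extract_res_for_pip extract_res_for_pip extract_res_for_pip_alt
  simp only []
  generalize (PySem.Str.split? text "\n").getD [] = lines
  rw [show (fun (st : Int × String × List Int × List Int × Int) line =>
      match st with
      | (count, modified_text, starts, ends, line_cnt) =>
        if PySem.Str.startswith line "```" then
          if PySem.Int.mod count 2 = 0 then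
            (count + 1, modified_text, starts ++ [line_cnt], ends, line_cnt + 1)
          else
            (count + 1, modified_text, starts, ends ++ [line_cnt], line_cnt + 1)
        else
          (count, modified_text ++ line ++ "\n", starts, ends, line_cnt + 1)) = pvStepA from rfl]
  rw [show (fun (segs : List (List String)) line =>
      if PySem.Str.startswith line "```" then segs ++ [[]]
      else segs.dropLast ++ [(segs.getLast?.getD []) ++ [line]]) = pvStepB from rfl]
  obtain ⟨h1, h2⟩ := pvInv lines 0 "" [] [] 0
  rw [if_pos (show PySem.Int.mod 0 2 = 0 from rfl)] at h1 h2
  rw [List.nil_append] at h1 h2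
  rw [h1, h2, pvFoldB_init, pvFences_eq lines 0]
  rw [pvSegs_length lines]
  rcases hF : pvFencesN lines with _ | ⟨a, _ | ⟨b, _ | ⟨c, t⟩⟩⟩
  · simp [pvEvens, pvOdds]
  · simp [pvEvens, pvOdds]
  · -- exactly two fences: both sides slice out the block
    have hget := pvSegs_get1 lines a b [] (by rw [hF])
    simp only [List.map_cons, List.map_nil, add_zero, pvEvens, pvOdds]
    have hA0 : PySem.List.pyGet? [(a : Int)] 0 = some (a : Int) :=
      PySem.List.pyGet?_zero_cons _ _
    have hB0 : PySem.List.pyGet? [(b : Int)] 0 = some (b : Int) :=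
      PySem.List.pyGet?_zero_cons _ _
    have hlen3 : (pvSegs lines).length = 3 := by rw [pvSegs_length, hF]; rfl
    have hseg1 : PySem.List.pyGet? (pvSegs lines) 1 =
        some ((lines.drop (a + 1)).take (b - (a + 1))) := by
      rw [PySem.List.pyGet?_of_nonneg _ (by omega)]
      simpa using hget
    have hslice : PySem.List.slice lines (some ((a : Int) + 1)) (some (b : Int)) =
        (lines.drop (a + 1)).take (b - (a + 1)) := by
      rw [show ((a : Int) + 1) = ((a + 1 : Nat) : Int) by push_cast; ring]
      exact PySem.List.slice_natCast lines (a + 1) b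
    simp only [hA0, hB0, hseg1, Option.getD_some, hslice]
    norm_num
  · -- at least three fences: the same error message on both sides
    simp only [List.map_cons]
    set t' : List Int := t.map (fun n : Nat => (n : Int) + 0) with ht'
    set L : List Int := ((a : Int) + 0) :: ((b : Int) + 0) :: ((c : Int) + 0) :: t' with hLdef
    obtain ⟨hle, hlo⟩ := pvLengths L
    have hlt : t'.length = t.length := by rw [ht']; simp
    have hLlen : L.length = t.length + 3 := by rw [hLdef]; simp [hlt]
    rw [hLlen] at hle hlo
    simp only [List.length_cons]
    by_cases hpar : (pvEvens L).length = (pvOdds L).length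
    · -- even number of fences, here ≥ 4: the "several code blocks" message
      rw [if_neg (show ¬ ((pvEvens L).length = 0 ∧ (pvOdds L).length = 0) by omega),
        if_neg (show ¬ (pvEvens L).length ≠ (pvOdds L).length from not_not_intro hpar),
        if_pos (show (pvEvens L).length > 1 by omega),
        if_neg (show ¬ (t.length + 1 + 1 + 1 + 1 = 1) by omega),
        if_neg (show ¬ ((t.length + 1 + 1 + 1 + 1) % 2 = 0) by omega),
        if_pos (show t.length + 1 + 1 + 1 + 1 > 3 by omega)]
    · -- odd number of fences: the "not conforming" message
      rw [if_neg (show ¬ ((pvEvens L).length = 0 ∧ (pvOdds L).length = 0) by omega),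
        if_pos hpar,
        if_neg (show ¬ (t.length + 1 + 1 + 1 + 1 = 1) by omega),
        if_pos (show (t.length + 1 + 1 + 1 + 1) % 2 = 0 by omega)]
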